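-- pv_equiv track=rewrite | github.com/Magmucot/PasswordKeeper | test.py | balance_parentheses
-- ===== SOURCE A (Python) =====
-- def balance_parentheses(expr):
--     res = []
--     stack = []
--     i = 0
--     while i < len(expr):
--         if expr[i:i+4] in ["sin(", "cos(", "tan(", "ctg("]:
--             res.append(expr[i:i+4])
--             stack.append(expr[i:i+4])
--             i += 4
--         elif expr[i:i+4] == "log(":
--             res.append("log(")
--             stack.append("log(")
--             i += 4
--         elif expr[i] == '(':
--             res.append('(')
--             stack.append('(')
--             i += 1
--         elif expr[i] == ')':
--             if stack:
--                 stack.pop()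
--                 res.append(')')
--             i += 1
--         else:
--             res.append(expr[i])
--             i += 1
--
--     # Закрыть незакрытые скобки
--     while stack:
--         stack.pop()
--         res.append(')')
--
--     return ''.join(res)
-- ===== SOURCE B (Python) =====
-- def balance_parentheses(expr):
--     out = []
--     depth = 0
--     for ch in expr:
--         if ch == '(':
--             out.append(ch)
--             depth += 1
--         elif ch == ')':
--             if depth > 0:
--                 out.append(ch)
--                 depth -= 1
--         else:
--             out.append(ch)
--     out.append(')' * depth)
--     return ''.join(out)
-- ===== Notes on version B (the rewrite author's own statement) =====
-- stated objective: simpler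
-- what changed: B scans character-by-character with a single integer depth counter instead of A's 4-character slice lookahead and string stack; the sin/cos/tan/ctg/log branches are dropped because they never change the output.
import Mathlib
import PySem

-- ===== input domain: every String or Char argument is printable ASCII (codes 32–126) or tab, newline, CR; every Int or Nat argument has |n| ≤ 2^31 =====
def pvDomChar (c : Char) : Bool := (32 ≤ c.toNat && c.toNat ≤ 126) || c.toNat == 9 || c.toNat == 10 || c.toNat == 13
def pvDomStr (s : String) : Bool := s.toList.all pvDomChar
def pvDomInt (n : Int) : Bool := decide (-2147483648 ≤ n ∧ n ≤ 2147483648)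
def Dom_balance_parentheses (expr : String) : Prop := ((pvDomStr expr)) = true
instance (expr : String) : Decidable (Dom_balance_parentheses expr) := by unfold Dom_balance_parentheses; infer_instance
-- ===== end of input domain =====

-- B replaces A's 4-char function-name lookahead + string stack with a plain
-- character scan keeping an integer depth counter (simpler; same output).

-- ===== PORT A =====
-- A's while loop over index i, transcribed as recursion on the remaining characters;
-- expr[i:i+4] is List.take 4 of the remainder, stack.pop() drops the last element,
-- and the final while-loop appending ')' per stack entry is the replicate in the [] case.
def pvA_loop (cs : List Char) (res stack : List String) : List String :=
  match cs with
  | [] => res ++ List.replicate stack.length ")"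
  | c :: rest =>
    if (c :: rest).take 4 = "sin(".toList ∨ (c :: rest).take 4 = "cos(".toList ∨
       (c :: rest).take 4 = "tan(".toList ∨ (c :: rest).take 4 = "ctg(".toList then
      pvA_loop ((c :: rest).drop 4) (res ++ [String.ofList ((c :: rest).take 4)])
        (stack ++ [String.ofList ((c :: rest).take 4)])
    else if (c :: rest).take 4 = "log(".toList then
      pvA_loop ((c :: rest).drop 4) (res ++ ["log("]) (stack ++ ["log("])
    else if c = '(' then
      pvA_loop rest (res ++ ["("]) (stack ++ ["("])
    else if c = ')' then
      if stack.isEmpty then pvA_loop rest res stack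
      else pvA_loop rest (res ++ [")"]) stack.dropLast
    else
      pvA_loop rest (res ++ [String.ofList [c]]) stack
termination_by cs.length
decreasing_by all_goals (simp; try omega)

def balance_parentheses (expr : String) : String :=
  String.join (pvA_loop expr.toList [] [])

-- ===== PORT B =====
def pvB_loop (cs : List Char) (out : List Char) (depth : Nat) : List Char :=
  match cs with
  | [] => out ++ List.replicate depth ')'
  | c :: rest =>
    if c = '(' then pvB_loop rest (out ++ [c]) (depth + 1)
    else if c = ')' then
      if 0 < depth then pvB_loop rest (out ++ [c]) (depth - 1)
      else pvB_loop rest out depth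
    else pvB_loop rest (out ++ [c]) depth

def balance_parentheses_alt (expr : String) : String :=
  String.ofList (pvB_loop expr.toList [] 0)

-- ===== PRECONDITION & SPEC =====
def Spec_balance_parentheses (expr : String) (out : String) : Prop := out = balance_parentheses_alt expr
instance (expr : String) (out : String) : Decidable (Spec_balance_parentheses expr out) := by unfold Spec_balance_parentheses; infer_instance

-- ===== CLAIM (what is proved, stated in full; the proofs are below) =====
def Claim_equal_balance_parentheses : Prop := ∀ (expr : String), Dom_balance_parentheses expr → Spec_balance_parentheses expr (balance_parentheses expr)

-- ===== LEMMAS AND PROOFS =====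

-- characters of a join of strings
def pvJC (l : List String) : List Char := (l.map String.toList).flatten

theorem pvJC_append (a b : List String) : pvJC (a ++ b) = pvJC a ++ pvJC b := by
  simp [pvJC]

theorem pvJC_replicate (n : Nat) : pvJC (List.replicate n ")") = List.replicate n ')' := by
  induction n with
  | zero => rfl
  | succ k ih =>
    simp only [List.replicate_succ, pvJC, List.map_cons, List.flatten_cons] at *
    simp

theorem pvB_acc (cs : List Char) : ∀ (out : List Char) (d : Nat),
    pvB_loop cs out d = out ++ pvB_loop cs [] d := by
  induction cs with
  | nil => intro out d; simp [pvB_loop]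
  | cons c rest ih =>
    intro out d
    simp only [pvB_loop]
    split_ifs with h1 h2 h3 <;> rw [ih] <;> try rw [ih ([] ++ [c])]
    all_goals simp

theorem pvB_word (x y z : Char) (hx1 : x ≠ '(') (hx2 : x ≠ ')')
    (hy1 : y ≠ '(') (hy2 : y ≠ ')') (hz1 : z ≠ '(') (hz2 : z ≠ ')')
    (rest : List Char) (d : Nat) :
    pvB_loop (x :: y :: z :: '(' :: rest) [] d
      = x :: y :: z :: '(' :: pvB_loop rest [] (d + 1) := by
  simp only [pvB_loop, if_neg hx1, if_neg hx2, if_neg hy1, if_neg hy2, if_neg hz1, if_neg hz2]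
  rw [pvB_acc]
  simp

theorem pv_take4_shape (cs : List Char) (a b c d : Char)
    (h : cs.take 4 = [a, b, c, d]) :
    cs = a :: b :: c :: d :: cs.drop 4 := by
  match cs with
  | [] => simp at h
  | [x] => simp at h
  | [x, y] => simp at h
  | [x, y, z] => simp at h
  | x :: y :: z :: w :: rest =>
    simp [List.take] at h
    obtain ⟨h1, h2, h3, h4⟩ := h
    simp [h1, h2, h3, h4, List.drop]

theorem pv_case2_aux (x y z : Char) (hx1 : x ≠ '(') (hx2 : x ≠ ')')
    (hy1 : y ≠ '(') (hy2 : y ≠ ')') (hz1 : z ≠ '(') (hz2 : z ≠ ')')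
    (R : List Char) (res stack : List String)
    (hword : List.take 4 (x :: y :: z :: '(' :: R) = "sin(".toList ∨
      List.take 4 (x :: y :: z :: '(' :: R) = "cos(".toList ∨
      List.take 4 (x :: y :: z :: '(' :: R) = "tan(".toList ∨
      List.take 4 (x :: y :: z :: '(' :: R) = "ctg(".toList)
    (ih : pvJC (pvA_loop R (res ++ [String.ofList [x, y, z, '(']])
            (stack ++ [String.ofList [x, y, z, '(']]))
        = pvJC (res ++ [String.ofList [x, y, z, '(']])
            ++ pvB_loop R [] (stack ++ [String.ofList [x, y, z, '(']]).length) :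
    pvJC (pvA_loop (x :: y :: z :: '(' :: R) res stack)
      = pvJC res ++ pvB_loop (x :: y :: z :: '(' :: R) [] stack.length := by
  rw [pvA_loop]
  rw [if_pos hword]
  have ht : List.take 4 (x :: y :: z :: '(' :: R) = [x, y, z, '('] := rfl
  have hd : List.drop 4 (x :: y :: z :: '(' :: R) = R := rfl
  rw [ht, hd, ih, pvB_word x y z hx1 hx2 hy1 hy2 hz1 hz2, pvJC_append]
  simp [pvJC]

theorem pv_case3_aux (R : List Char) (res stack : List String)
    (h1 : ¬(List.take 4 ('l' :: 'o' :: 'g' :: '(' :: R) = "sin(".toList ∨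
      List.take 4 ('l' :: 'o' :: 'g' :: '(' :: R) = "cos(".toList ∨
      List.take 4 ('l' :: 'o' :: 'g' :: '(' :: R) = "tan(".toList ∨
      List.take 4 ('l' :: 'o' :: 'g' :: '(' :: R) = "ctg(".toList))
    (ih : pvJC (pvA_loop R (res ++ ["log("]) (stack ++ ["log("]))
        = pvJC (res ++ ["log("]) ++ pvB_loop R [] (stack ++ ["log("]).length) :
    pvJC (pvA_loop ('l' :: 'o' :: 'g' :: '(' :: R) res stack)
      = pvJC res ++ pvB_loop ('l' :: 'o' :: 'g' :: '(' :: R) [] stack.length := by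
  have hlog : List.take 4 ('l' :: 'o' :: 'g' :: '(' :: R) = "log(".toList := by rfl
  have hd : List.drop 4 ('l' :: 'o' :: 'g' :: '(' :: R) = R := rfl
  rw [pvA_loop, if_neg h1, if_pos hlog, hd]
  rw [ih, pvB_word 'l' 'o' 'g' (by decide) (by decide) (by decide) (by decide) (by decide) (by decide), pvJC_append]
  simp [pvJC]

theorem pv_main (cs : List Char) (res stack : List String) :
    pvJC (pvA_loop cs res stack) = pvJC res ++ pvB_loop cs [] stack.length := by
  induction cs, res, stack using pvA_loop.induct with
  | case1 res stack =>
    rw [pvA_loop]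
    simp [pvB_loop, pvJC_append, pvJC_replicate]
  | case2 res stack c rest h ih =>
    have hall := h
    rcases h with h | h | h | h
    · have hsh := pv_take4_shape (c :: rest) 's' 'i' 'n' '(' (by simpa using h)
      have he : ("sin(".toList : List Char) = ['s', 'i', 'n', '('] := by decide
      rw [h, he] at ih
      rw [hsh]
      exact pv_case2_aux 's' 'i' 'n' (by decide) (by decide) (by decide) (by decide)
        (by decide) (by decide) _ res stack (by rw [← hsh]; exact hall) ih
    · have hsh := pv_take4_shape (c :: rest) 'c' 'o' 's' '(' (by simpa using h)
      have he : ("cos(".toList : List Char) = ['c', 'o', 's', '('] := by decide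
      rw [h, he] at ih
      rw [hsh]
      exact pv_case2_aux 'c' 'o' 's' (by decide) (by decide) (by decide) (by decide)
        (by decide) (by decide) _ res stack (by rw [← hsh]; exact hall) ih
    · have hsh := pv_take4_shape (c :: rest) 't' 'a' 'n' '(' (by simpa using h)
      have he : ("tan(".toList : List Char) = ['t', 'a', 'n', '('] := by decide
      rw [h, he] at ih
      rw [hsh]
      exact pv_case2_aux 't' 'a' 'n' (by decide) (by decide) (by decide) (by decide)
        (by decide) (by decide) _ res stack (by rw [← hsh]; exact hall) ih
    · have hsh := pv_take4_shape (c :: rest) 'c' 't' 'g' '(' (by simpa using h)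
      have he : ("ctg(".toList : List Char) = ['c', 't', 'g', '('] := by decide
      rw [h, he] at ih
      rw [hsh]
      exact pv_case2_aux 'c' 't' 'g' (by decide) (by decide) (by decide) (by decide)
        (by decide) (by decide) _ res stack (by rw [← hsh]; exact hall) ih
  | case3 res stack c rest h1 h ih =>
    have hsh := pv_take4_shape (c :: rest) 'l' 'o' 'g' '(' (by simpa using h)
    rw [hsh]
    exact pv_case3_aux _ res stack (by rw [← hsh]; exact h1) ih
  | case4 res stack rest h1 h2 ih =>
    rw [pvA_loop, if_neg h1, if_neg h2, if_pos rfl, ih]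
    have hb : pvB_loop ('(' :: rest) [] stack.length
        = '(' :: pvB_loop rest [] (stack.length + 1) := by
      simp only [pvB_loop]
      rw [pvB_acc]
      simp
    rw [hb, pvJC_append]
    simp [pvJC]
  | case5 res stack rest hs h1 h2 h3 ih =>
    rw [List.isEmpty_iff] at hs
    subst hs
    rw [pvA_loop, if_neg h1, if_neg h2, if_neg h3, if_pos rfl]
    simp only [List.isEmpty_nil, if_true]
    rw [ih]
    have hb : pvB_loop (')' :: rest) [] ([] : List String).length
        = pvB_loop rest [] 0 := by
      simp [pvB_loop]
    rw [hb]
    rfl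
  | case6 res stack rest hs h1 h2 h3 ih =>
    rw [pvA_loop, if_neg h1, if_neg h2, if_neg h3, if_pos rfl, if_neg hs, ih]
    have hpos : 0 < stack.length := by
      cases stack with
      | nil => simp at hs
      | cons a t => simp
    have hb : pvB_loop (')' :: rest) [] stack.length
        = ')' :: pvB_loop rest [] (stack.length - 1) := by
      simp only [pvB_loop, if_neg (by decide : ¬(')' = '(')), if_pos hpos]
      rw [pvB_acc]
      simp
    rw [hb, pvJC_append, List.length_dropLast]
    simp [pvJC]
  | case7 res stack c rest h1 h2 h3 h4 ih =>
    rw [pvA_loop, if_neg h1, if_neg h2, if_neg h3, if_neg h4, ih]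
    have hb : pvB_loop (c :: rest) [] stack.length
        = c :: pvB_loop rest [] stack.length := by
      simp only [pvB_loop, if_neg h3, if_neg h4]
      rw [pvB_acc]
      simp
    rw [hb, pvJC_append]
    simp [pvJC]

theorem pv_join_toList (l : List String) :
    (String.join l).toList = pvJC l := by
  have h : ∀ (l : List String) (s : String),
      (l.foldl (· ++ ·) s).toList = s.toList ++ pvJC l := by
    intro l
    induction l with
    | nil => intro s; simp [pvJC]
    | cons x xs ih => intro s; simp [List.foldl, ih, pvJC]
  simpa [String.join, pvJC] using h l ""

-- ===== VERDICT (by name: the statement is the Claim_ definition above) =====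
theorem balance_parentheses_spec : Claim_equal_balance_parentheses := by
  intro expr _
  unfold Spec_balance_parentheses balance_parentheses balance_parentheses_alt
  have h1 := pv_join_toList (pvA_loop expr.toList [] [])
  rw [pv_main] at h1
  have h2 : (String.join (pvA_loop expr.toList [] [])).toList = pvB_loop expr.toList [] 0 := by
    simpa [pvJC] using h1
  calc String.join (pvA_loop expr.toList [] [])
      = String.ofList (String.join (pvA_loop expr.toList [] [])).toList := (String.ofList_toList).symm
    _ = String.ofList (pvB_loop expr.toList [] 0) := by rw [h2]
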